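-- pv_equiv track=rewrite | github.com/qich3n/BallPulse | src/app/services/proscons_service.py | _generate_cons_from_sentiment
-- ===== SOURCE A (Python) =====
-- from typing import List, Dict, Any, Optional
--
-- def _generate_cons_from_sentiment(sentiment_summary: str) -> List[str]:
--     """Generate cons from sentiment analysis"""
--     cons = []
--
--     if not sentiment_summary:
--         return cons
--
--     summary_lower = sentiment_summary.lower()
--
--     if any(word in summary_lower for word in ['negative', 'concerns', 'worries', 'uncertainty']):
--         cons.append("Community sentiment shows concerns")
--     if any(word in summary_lower for word in ['poor', 'disappointing', 'struggling']):
--         cons.append("Disappointing performance from fan perspective")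
--     if 'mixed' in summary_lower or 'uncertain' in summary_lower:
--         cons.append("Uncertainty in team outlook")
--
--     return cons
-- ===== SOURCE B (Python) =====
-- from typing import List
--
-- _RULES = [
--     (('negative', 'concerns', 'worries', 'uncertainty'), "Community sentiment shows concerns"),
--     (('poor', 'disappointing', 'struggling'), "Disappointing performance from fan perspective"),
--     (('mixed', 'uncertain'), "Uncertainty in team outlook"),
-- ]
--
-- def _generate_cons_from_sentiment(sentiment_summary: str) -> List[str]:
--     # One left-to-right scan of the lowercased text: at each position, mark any
--     # rule one of whose keywords starts there (naive multi-pattern matcher).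
--     text = sentiment_summary.lower()
--     hit = [False] * len(_RULES)
--     for i in range(len(text)):
--         for j, (words, _msg) in enumerate(_RULES):
--             if not hit[j] and any(text.startswith(w, i) for w in words):
--                 hit[j] = True
--     return [msg for j, (_words, msg) in enumerate(_RULES) if hit[j]]
-- ===== Notes on version B (the rewrite author's own statement) =====
-- stated objective: alternative
-- what changed: Instead of asking per rule whether some keyword is a substring (three independent substring searches), B lowercases once and makes a single left-to-right scan over the text positions, a naive multi-pattern matcher marking a rule as hit when one of its keywords starts at the current position, then emits the messages of the hit rules.
import Mathlib
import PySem

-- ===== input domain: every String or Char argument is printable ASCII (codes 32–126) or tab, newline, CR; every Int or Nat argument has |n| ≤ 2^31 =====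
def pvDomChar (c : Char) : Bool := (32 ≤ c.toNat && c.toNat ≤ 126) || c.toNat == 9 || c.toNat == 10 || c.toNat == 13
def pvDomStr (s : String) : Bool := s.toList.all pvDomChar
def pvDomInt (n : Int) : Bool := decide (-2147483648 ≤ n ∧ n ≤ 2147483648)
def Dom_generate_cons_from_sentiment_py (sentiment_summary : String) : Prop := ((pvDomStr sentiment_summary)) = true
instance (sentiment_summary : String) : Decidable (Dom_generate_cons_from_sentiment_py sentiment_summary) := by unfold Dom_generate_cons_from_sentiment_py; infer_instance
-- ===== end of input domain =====

-- B replaces per-rule substring tests by a single left-to-right position scan (naive multi-pattern matcher); alternative structure, same values.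


-- ===== PORT A =====
def generate_cons_from_sentiment_py (sentiment_summary : String) : List String :=
  let cons : List String := []
  if sentiment_summary = "" then cons
  else
    let summary_lower := PySem.Str.lower sentiment_summary
    let cons := if (["negative", "concerns", "worries", "uncertainty"].any
        (fun word => PySem.Str.isIn word summary_lower)) then
      cons ++ ["Community sentiment shows concerns"] else cons
    let cons := if (["poor", "disappointing", "struggling"].any
        (fun word => PySem.Str.isIn word summary_lower)) then
      cons ++ ["Disappointing performance from fan perspective"] else cons
    let cons := if (PySem.Str.isIn "mixed" summary_lower || PySem.Str.isIn "uncertain" summary_lower) then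
      cons ++ ["Uncertainty in team outlook"] else cons
    cons

-- ===== PORT B =====
-- the rules table: (keywords, message), in order
def consRules : List (List String × String) :=
  [(["negative", "concerns", "worries", "uncertainty"], "Community sentiment shows concerns"),
   (["poor", "disappointing", "struggling"], "Disappointing performance from fan perspective"),
   (["mixed", "uncertain"], "Uncertainty in team outlook")]

-- text.startswith(w, i): exact on code points — keyword starts at position i
def startsAt (text : List Char) (i : Nat) (w : String) : Bool :=
  w.toList.isPrefixOf (text.drop i)

-- hit[j] after one position step: hit[j] := hit[j] or (not hit[j] and any keyword of rule j starts at i)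
def scanStep (text : List Char) (h : Bool × Bool × Bool) (i : Nat) : Bool × Bool × Bool :=
  ((if !h.1 && (consRules[0]!.1.any (startsAt text i)) then true else h.1),
   (if !h.2.1 && (consRules[1]!.1.any (startsAt text i)) then true else h.2.1),
   (if !h.2.2 && (consRules[2]!.1.any (startsAt text i)) then true else h.2.2))

def generate_cons_from_sentiment_py_alt (sentiment_summary : String) : List String :=
  let text := (PySem.Str.lower sentiment_summary).toList
  let hit := (List.range text.length).foldl (scanStep text) (false, false, false)
  ((if hit.1 then [consRules[0]!.2] else []) ++
   (if hit.2.1 then [consRules[1]!.2] else []) ++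
   (if hit.2.2 then [consRules[2]!.2] else []))

-- ===== PRECONDITION & SPEC =====
def Spec_generate_cons_from_sentiment_py (sentiment_summary : String) (out : List String) : Prop := out = generate_cons_from_sentiment_py_alt sentiment_summary
instance (sentiment_summary : String) (out : List String) : Decidable (Spec_generate_cons_from_sentiment_py sentiment_summary out) := by unfold Spec_generate_cons_from_sentiment_py; infer_instance

-- ===== CLAIM (what is proved, stated in full; the proofs are below) =====
def Claim_equal_generate_cons_from_sentiment_py : Prop := ∀ (sentiment_summary : String), Dom_generate_cons_from_sentiment_py sentiment_summary → Spec_generate_cons_from_sentiment_py sentiment_summary (generate_cons_from_sentiment_py sentiment_summary)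

-- ===== LEMMAS AND PROOFS =====

-- the triple fold is three independent 'or'-folds
theorem scan_foldl (text : List Char) (l : List Nat) (b1 b2 b3 : Bool) :
    l.foldl (scanStep text) (b1, b2, b3) =
      (b1 || l.any (fun i => consRules[0]!.1.any (startsAt text i)),
       b2 || l.any (fun i => consRules[1]!.1.any (startsAt text i)),
       b3 || l.any (fun i => consRules[2]!.1.any (startsAt text i))) := by
  induction l generalizing b1 b2 b3 with
  | nil => simp
  | cons x xs ih =>
    simp only [List.foldl_cons, List.any_cons, scanStep, ih]
    cases b1 <;> cases b2 <;> cases b3 <;>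
      cases h1 : consRules[0]!.1.any (startsAt text x) <;>
      cases h2 : consRules[1]!.1.any (startsAt text x) <;>
      cases h3 : consRules[2]!.1.any (startsAt text x) <;> simp

-- the position scan for one nonempty keyword equals the substring test
theorem scan_word (w : String) (hw : w.toList ≠ []) (t : List Char) :
    ((List.range t.length).any (fun i => startsAt t i w)) = PySem.Chars.isIn w.toList t := by
  cases h : PySem.Chars.isIn w.toList t with
  | true =>
    obtain ⟨j, hj⟩ := (PySem.Chars.exists_prefix_drop_iff_isIn w.toList t).2 h
    have hjlt : j < t.length := by
      by_contra hge
      have hnil : t.drop j = [] := List.drop_eq_nil_of_le (by omega)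
      rw [hnil, List.prefix_nil] at hj
      exact hw hj
    simp only [List.any_eq_true, List.mem_range]
    exact ⟨j, hjlt, by simpa [startsAt, List.isPrefixOf_iff_prefix] using hj⟩
  | false =>
    simp only [List.any_eq_false, List.mem_range]
    intro i _ hpre
    exact absurd ((PySem.Chars.exists_prefix_drop_iff_isIn w.toList t).1
        ⟨i, by simpa [startsAt, List.isPrefixOf_iff_prefix] using hpre⟩) (by simp [h])

-- scan over the whole rule = Python's any(word in text) for that rule
theorem scan_rule (ws : List String) (hws : ∀ w ∈ ws, w.toList ≠ []) (s : String) :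
    ((List.range s.toList.length).any (fun i => ws.any (fun w => startsAt s.toList i w))) =
      ws.any (fun w => PySem.Str.isIn w s) := by
  rw [Bool.eq_iff_iff]
  simp only [List.any_eq_true, List.mem_range, PySem.Str.isIn_eq]
  constructor
  · rintro ⟨i, hi, w, hw, hp⟩
    refine ⟨w, hw, ?_⟩
    rw [← scan_word w (hws w hw) s.toList]
    exact List.any_eq_true.2 ⟨i, List.mem_range.2 hi, hp⟩
  · rintro ⟨w, hw, hin⟩
    rw [← scan_word w (hws w hw) s.toList] at hin
    obtain ⟨i, hi, hp⟩ := List.any_eq_true.1 hin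
    exact ⟨i, List.mem_range.1 hi, w, hw, hp⟩

-- ===== VERDICT (by name: the statement is the Claim_ definition above) =====
theorem generate_cons_from_sentiment_py_spec : Claim_equal_generate_cons_from_sentiment_py := by
  intro s _
  unfold Spec_generate_cons_from_sentiment_py
  show generate_cons_from_sentiment_py s = generate_cons_from_sentiment_py_alt s
  by_cases h : s = ""
  · subst h; decide
  · have r1 := scan_rule ["negative", "concerns", "worries", "uncertainty"] (by decide) (PySem.Str.lower s)
    have r2 := scan_rule ["poor", "disappointing", "struggling"] (by decide) (PySem.Str.lower s)
    have r3 := scan_rule ["mixed", "uncertain"] (by decide) (PySem.Str.lower s)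
    simp only [generate_cons_from_sentiment_py, generate_cons_from_sentiment_py_alt, h, if_false,
      scan_foldl, Bool.false_or, consRules, List.getElem!_cons_zero, List.getElem!_cons_succ]
    rw [r1, r2, r3]
    simp only [List.any_cons, List.any_nil, Bool.or_false]
    split_ifs <;> simp_all
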